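-- pv_equiv track=rewrite | github.com/Johnny785/BeijingSHIYOU | problem1.py | countMinSubsequences
-- ===== SOURCE A (Python) =====
-- def countMinSubsequences(source:str, target:str):
--     reverse_map = {}
--     for i in range(len(source)):
--         if not reverse_map.__contains__(source[i]):
--             reverse_map[source[i]] = []
--             reverse_map[source[i]].append(i)
--         else:
--             reverse_map[source[i]].append(i)
--
--     current_index = -1
--     subseq_count = 0
--     step = 0
--     while step < len(target):
--         # No existence
--         if not reverse_map.__contains__(target[step]):
--             return -1
--         # Find an index that is more than index
--         found = False
--         for index in reverse_map[target[step]]: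
--             if index > current_index:
--                 current_index = index
--                 found = True
--                 break
--         if not found:
--             subseq_count += 1
--             current_index = -1
--             continue
--         step += 1
--
--     # The last chunk will never be added since it will not detect an end of the current sequence, so we must account for that here
--     return subseq_count + 1
-- ===== SOURCE B (Python) =====
-- def countMinSubsequences(source: str, target: str):
--     positions = {}
--     for i, ch in enumerate(source):
--         positions.setdefault(ch, []).append(i)
--     count = 1
--     cur = -1
--     for ch in target:
--         lst = positions.get(ch)
--         if lst is None:
--             return -1
--         # binary search: first index in lst strictly greater than cur
--         lo, hi = 0, len(lst)
--         while lo < hi: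
--             mid = (lo + hi) // 2
--             if lst[mid] > cur:
--                 hi = mid
--             else:
--                 lo = mid + 1
--         if lo == len(lst):
--             count += 1
--             cur = lst[0]
--         else:
--             cur = lst[lo]
--     return count
-- ===== Notes on version B (the rewrite author's own statement) =====
-- stated objective: faster
-- what changed: B replaces A's linear scan through each character's index list (and A's reset-and-retry step on failure) by a hand-written binary search for the first source index greater than the cursor, taking the list head directly when a new pass starts.
import Mathlib
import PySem

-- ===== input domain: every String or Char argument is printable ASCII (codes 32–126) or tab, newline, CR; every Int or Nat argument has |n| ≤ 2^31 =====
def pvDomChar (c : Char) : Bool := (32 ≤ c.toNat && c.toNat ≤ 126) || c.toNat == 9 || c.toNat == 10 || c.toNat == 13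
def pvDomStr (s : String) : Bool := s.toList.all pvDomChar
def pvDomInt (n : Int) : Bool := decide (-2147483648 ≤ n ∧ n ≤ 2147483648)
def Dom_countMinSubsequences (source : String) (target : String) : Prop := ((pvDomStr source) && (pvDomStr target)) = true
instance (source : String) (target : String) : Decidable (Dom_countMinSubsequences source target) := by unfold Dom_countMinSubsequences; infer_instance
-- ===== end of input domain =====

-- ===== PORT A =====
-- B replaces A's linear scan of each index list by a hand-written binary search (objective: faster; O(T*S) -> O(T*log S) worst case).

-- A's inner 'for index in reverse_map[target[step]]: if index > current_index: break' scan
def pvScanFirst (cur : Int) : List Int → Option Int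
  | [] => none
  | x :: xs => if x > cur then some x else pvScanFirst cur xs

-- A's dict-building loop ('for i in range(len(source))' reading source[i] = fold over enumerate)
def pvBuildA (chars : List Char) : PySem.Dict Char (List Int) :=
  (PySem.List.enumerate chars).foldl
    (fun rm p =>
      if rm.contains p.2 then rm.modify p.2 [] (fun l => l ++ [p.1])
      else (rm.insert p.2 []).modify p.2 [] (fun l => l ++ [p.1]))
    PySem.Dict.empty

-- A's while loop; 'step' does not always advance, so the port carries fuel (2*|target|+1
-- provably suffices, since every stored index list is nonempty with entries > -1: the
-- fuel-out value 0 is never reached — see pvLoopA_eq_loopB below).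
def pvLoopA (rm : PySem.Dict Char (List Int)) (tgt : List Char) :
    Nat → Nat → Int → Int → Int
  | 0, _, _, _ => 0
  | fuel+1, step, cur, count =>
    if h : step < tgt.length then
      match rm.get? tgt[step] with
      | none => -1
      | some lst =>
        match pvScanFirst cur lst with
        | some idx => pvLoopA rm tgt fuel (step+1) idx count
        | none => pvLoopA rm tgt fuel step (-1) (count+1)
    else count + 1

def countMinSubsequences (source : String) (target : String) : Int :=
  pvLoopA (pvBuildA source.toList) target.toList
    (2 * target.toList.length + 1) 0 (-1) 0

-- ===== PORT B =====
-- Source B's hand-written 'while lo < hi' binary search: first position in lst whose entry is > cur.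
-- lst[mid] is ported as (pyGet? lst mid).getD 0: 0 ≤ lo ≤ mid < hi ≤ len lst keeps mid in range,
-- so the default is never read.
def pvBisect (lst : List Int) (cur : Int) (lo hi : Nat) : Nat :=
  if _h : lo < hi then
    let mid := (lo + hi) / 2
    if (PySem.List.pyGet? lst (mid : Int)).getD 0 > cur then pvBisect lst cur lo mid
    else pvBisect lst cur (mid + 1) hi
  else lo
termination_by hi - lo
decreasing_by all_goals omega

-- Source B's 'positions.setdefault(ch, []).append(i)' loop over enumerate(source)
def pvBuildB (chars : List Char) : PySem.Dict Char (List Int) :=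
  (PySem.List.enumerate chars).foldl
    (fun d p => (d.setdefault p.2 []).modify p.2 [] (fun l => l ++ [p.1]))
    PySem.Dict.empty

-- Source B's 'for ch in target' loop; lst[0]/lst[lo] ported as (pyGet? …).getD 0 (in range: lst is
-- nonempty whenever stored, and lo < len lst in the second branch).
def pvLoopB (pos : PySem.Dict Char (List Int)) : List Char → Int → Int → Int
  | [], _, count => count
  | ch :: rest, cur, count =>
    match pos.get? ch with
    | none => -1
    | some lst =>
      let lo := pvBisect lst cur 0 lst.length
      if lo = lst.length then
        pvLoopB pos rest ((PySem.List.pyGet? lst ((0 : Nat) : Int)).getD 0) (count + 1)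
      else
        pvLoopB pos rest ((PySem.List.pyGet? lst ((lo : Nat) : Int)).getD 0) count

def countMinSubsequences_alt (source : String) (target : String) : Int :=
  pvLoopB (pvBuildB source.toList) target.toList (-1) 1

-- ===== PRECONDITION & SPEC =====
def Spec_countMinSubsequences (source : String) (target : String) (out : Int) : Prop := out = countMinSubsequences_alt source target
instance (source : String) (target : String) (out : Int) : Decidable (Spec_countMinSubsequences source target out) := by unfold Spec_countMinSubsequences; infer_instance

-- ===== CLAIM (what is proved, stated in full; the proofs are below) =====
def Claim_equal_countMinSubsequences : Prop := ∀ (source : String) (target : String), Dom_countMinSubsequences source target → Spec_countMinSubsequences source target (countMinSubsequences source target)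

-- ===== LEMMAS AND PROOFS =====

-- get? from contains and getD (glue between the PySem.Dict lemma families)
lemma pvGet?_eq (d : PySem.Dict Char (List Int)) (c : Char) :
    d.get? c = if d.contains c then some (d.getD c []) else none := by
  cases h : d.get? c with
  | none => simp [h, PySem.Dict.contains_eq_isSome_get?]
  | some v => simp [h, PySem.Dict.contains_eq_isSome_get?, PySem.Dict.getD_eq_get?_getD]

-- the two dict-building loops are the same fold
lemma pvBuild_eq (cs : List Char) : pvBuildA cs = pvBuildB cs := by
  unfold pvBuildA pvBuildB
  congr 1
  funext d p
  by_cases h : d.contains p.2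
  · rw [PySem.Dict.setdefault_of_contains d [] h]; simp [h]
  · rw [PySem.Dict.setdefault_of_not_contains d [] (by simpa using h)]; simp [h]

-- the build invariant: every stored list is nonempty, strictly increasing, with entries ≥ 0
def pvGood (d : PySem.Dict Char (List Int)) : Prop :=
  ∀ c lst, d.get? c = some lst → lst ≠ [] ∧ lst.Pairwise (· < ·) ∧ ∀ x ∈ lst, 0 ≤ x

lemma pvBuildB_go (cs : List Char) : ∀ (s : Int) (d : PySem.Dict Char (List Int)),
    0 ≤ s → pvGood d → (∀ c lst, d.get? c = some lst → ∀ x ∈ lst, x < s) →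
    pvGood ((PySem.List.enumerate cs s).foldl
      (fun d p => (d.setdefault p.2 []).modify p.2 [] (fun l => l ++ [p.1])) d) := by
  induction cs with
  | nil => intro s d _ hg _; simpa [PySem.List.enumerate] using hg
  | cons ch cs ih =>
    intro s d hs hg hb
    rw [PySem.List.enumerate_cons, List.foldl_cons]
    set d' := (d.setdefault ch []).modify ch [] (fun l => l ++ [s]) with hd'
    -- one assignment step: d' agrees with d except at ch, where s is appended
    have hstep : ∀ c, d'.get? c =
        if c = ch then some (d.getD ch [] ++ [s]) else d.get? c := by
      intro c
      by_cases hcch : c = ch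
      · subst hcch
        rw [pvGet?_eq, if_pos rfl]
        have h1 : d'.contains c = true := by
          rw [hd', PySem.Dict.contains_modify]; simp
        have h2 : d'.getD c [] = d.getD c [] ++ [s] := by
          rw [hd', PySem.Dict.getD_modify_self, PySem.Dict.getD_setdefault_self]
        rw [h1, h2]
        simp
      · rw [pvGet?_eq, if_neg hcch, pvGet?_eq]
        have h1 : d'.contains c = d.contains c := by
          rw [hd', PySem.Dict.contains_modify, PySem.Dict.contains_setdefault]
          simp [hcch]
        have h2 : d'.getD c [] = d.getD c [] := by
          rw [hd', PySem.Dict.getD_modify_of_ne _ _ _ hcch,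
            PySem.Dict.getD_eq_get?_getD, PySem.Dict.get?_setdefault_of_ne _ _ hcch,
            PySem.Dict.getD_eq_get?_getD]
        rw [h1, h2]
    -- what is stored at ch before the step is good and bounded by s
    have hold : (d.getD ch []).Pairwise (· < ·) ∧ (∀ x ∈ d.getD ch [], 0 ≤ x) ∧
        (∀ x ∈ d.getD ch [], x < s) := by
      cases h : d.get? ch with
      | none => simp [PySem.Dict.getD_eq_get?_getD, h]
      | some l =>
        have := hg ch l h
        simp only [PySem.Dict.getD_eq_get?_getD, h, Option.getD_some]
        exact ⟨this.2.1, this.2.2, hb ch l h⟩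
    refine ih (s + 1) d' (by omega) ?_ ?_
    · intro c lst hc
      rw [hstep] at hc
      by_cases hcch : c = ch
      · rw [if_pos hcch] at hc
        obtain ⟨rfl⟩ : lst = d.getD ch [] ++ [s] := by simpa using hc.symm
        refine ⟨by simp, ?_, ?_⟩
        · rw [List.pairwise_append]
          exact ⟨hold.1, by simp, by simpa using hold.2.2⟩
        · intro x hx
          rcases List.mem_append.mp hx with hx | hx
          · exact hold.2.1 x hx
          · simp at hx; omega
      · rw [if_neg hcch] at hc
        exact hg c lst hc
    · intro c lst hc x hx
      rw [hstep] at hc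
      by_cases hcch : c = ch
      · rw [if_pos hcch] at hc
        obtain ⟨rfl⟩ : lst = d.getD ch [] ++ [s] := by simpa using hc.symm
        rcases List.mem_append.mp hx with hx | hx
        · have := hold.2.2 x hx; omega
        · simp at hx; omega
      · rw [if_neg hcch] at hc
        have := hb c lst hc x hx; omega

lemma pvBuildB_good (cs : List Char) : pvGood (pvBuildB cs) := by
  refine pvBuildB_go cs 0 PySem.Dict.empty (by omega) ?_ ?_ <;>
    intro c lst h <;> simp [PySem.Dict.get?_empty] at h

-- the linear scan finds the first element greater than cur
lemma pvScanFirst_of_first (cur : Int) (lst : List Int) (k : Nat) (hk : k < lst.length)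
    (hlow : ∀ i, (hi : i < lst.length) → i < k → lst[i] ≤ cur) (hhit : cur < lst[k]) :
    pvScanFirst cur lst = some lst[k] := by
  induction lst generalizing k with
  | nil => simp at hk
  | cons x xs ih =>
    cases k with
    | zero =>
      have : cur < x := by simpa using hhit
      simp [pvScanFirst, this]
    | succ k =>
      have hx : x ≤ cur := hlow 0 (by simp) (by omega)
      simp only [pvScanFirst, if_neg (not_lt.mpr hx)]
      have := ih k (by simpa using hk)
        (fun i hi hik => by simpa using hlow (i+1) (by simpa using hi) (by omega))
        (by simpa using hhit)
      simpa using this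

lemma pvScanFirst_of_none (cur : Int) (lst : List Int)
    (h : ∀ x ∈ lst, x ≤ cur) : pvScanFirst cur lst = none := by
  induction lst with
  | nil => rfl
  | cons x xs ih =>
    have hx := h x (by simp)
    simp [pvScanFirst, not_lt.mpr hx]
    exact ih (fun y hy => h y (by simp [hy]))

-- binary-search correctness on a strictly increasing list
lemma pvBisect_spec (lst : List Int) (cur : Int)
    (hmono : lst.Pairwise (· < ·)) : ∀ (n lo hi : Nat), hi - lo ≤ n → lo ≤ hi → hi ≤ lst.length →
    (∀ i, (hi' : i < lst.length) → i < lo → lst[i] ≤ cur) →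
    (∀ i, (hi' : i < lst.length) → hi ≤ i → cur < lst[i]) →
    pvBisect lst cur lo hi ≤ lst.length ∧
      (∀ i, (hi' : i < lst.length) → i < pvBisect lst cur lo hi → lst[i] ≤ cur) ∧
      (∀ (hr : pvBisect lst cur lo hi < lst.length), cur < lst[pvBisect lst cur lo hi]) := by
  have hm : ∀ p q (hp : p < lst.length) (hq : q < lst.length), p ≤ q → lst[p] ≤ lst[q] := by
    intro p q hp hq hpq
    rcases Nat.eq_or_lt_of_le hpq with rfl | hlt
    · exact le_refl _
    · exact le_of_lt (List.pairwise_iff_getElem.mp hmono p q hp hq hlt)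
  intro n
  induction n with
  | zero =>
    intro lo hi hn hlh hhl hlow hhigh
    have : lo = hi := by omega
    subst this
    rw [pvBisect, dif_neg (by omega)]
    exact ⟨by omega, hlow, fun hr => hhigh _ hr (le_refl _)⟩
  | succ n ih =>
    intro lo hi hn hlh hhl hlow hhigh
    by_cases h : lo < hi
    · rw [pvBisect, dif_pos h]
      have hmid : lo ≤ (lo + hi) / 2 ∧ (lo + hi) / 2 < hi := by omega
      have hmlt : (lo + hi) / 2 < lst.length := by omega
      have hget : (PySem.List.pyGet? lst (((lo + hi) / 2 : Nat) : Int)).getD 0 = lst[(lo + hi) / 2] := by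
        rw [PySem.List.pyGet?_natCast]
        simp [hmlt]
      simp only [hget]
      by_cases hc : lst[(lo + hi) / 2] > cur
      · simp only [if_pos hc]
        exact ih lo ((lo + hi) / 2) (by omega) (by omega) (by omega) hlow
          (fun i hi' hle => lt_of_lt_of_le hc (hm _ _ hmlt hi' hle))
      · simp only [if_neg hc]
        refine ih ((lo + hi) / 2 + 1) hi (by omega) (by omega) hhl ?_ hhigh
        intro i hi' hilt
        exact le_trans (hm i ((lo + hi) / 2) hi' hmlt (by omega)) (not_lt.mp hc)
    · rw [pvBisect, dif_neg h]
      exact ⟨by omega, hlow, fun hr => hhigh _ hr (by omega)⟩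

-- the two main loops agree (A's count is one behind B's; each target position costs A at most
-- two fuel units, so any fuel ≥ 2*(remaining length)+1 is enough)
lemma pvLoopA_eq_loopB (d : PySem.Dict Char (List Int)) (hd : pvGood d) (tgt : List Char) :
    ∀ (rest : List Char) (step : Nat) (cur count : Int) (fuel : Nat),
    tgt.drop step = rest → 2 * (tgt.length - step) + 1 ≤ fuel →
    pvLoopA d tgt fuel step cur count = pvLoopB d rest cur (count + 1) := by
  intro rest
  induction rest with
  | nil =>
    intro step cur count fuel hdrop hfuel
    have hge : tgt.length ≤ step := List.drop_eq_nil_iff.mp hdrop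
    obtain ⟨f, rfl⟩ : ∃ f, fuel = f + 1 := ⟨fuel - 1, by omega⟩
    rw [pvLoopA, dif_neg (by omega)]
    rfl
  | cons ch rest ih =>
    intro step cur count fuel hdrop hfuel
    have hlt : step < tgt.length := by
      by_contra hge
      rw [List.drop_eq_nil_of_le (by omega)] at hdrop
      simp at hdrop
    have hcons := List.drop_eq_getElem_cons (l := tgt) hlt
    rw [hdrop] at hcons
    obtain ⟨h1, h2⟩ : ch = tgt[step] ∧ rest = tgt.drop (step + 1) := by
      injection hcons with h1 h2; exact ⟨h1, h2⟩
    have hch : tgt[step] = ch := h1.symm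
    have hrest : tgt.drop (step + 1) = rest := h2.symm
    obtain ⟨f, rfl⟩ : ∃ f, fuel = f + 2 := ⟨fuel - 2, by omega⟩
    rw [pvLoopA, dif_pos hlt]
    simp only [hch]
    rw [pvLoopB]
    cases hlst : d.get? ch with
    | none => rfl
    | some lst =>
      dsimp only
      obtain ⟨hne, hpw, hpos⟩ := hd ch lst hlst
      have hlen0 : 0 < lst.length := List.length_pos_iff.mpr hne
      obtain ⟨hrle, hrlow, hrhit⟩ := pvBisect_spec lst cur hpw lst.length 0 lst.length
        (by omega) (by omega) (le_refl _) (by omega) (fun i hi' hge => by omega)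
      set r := pvBisect lst cur 0 lst.length with hr
      by_cases hrlen : r = lst.length
      · -- no index beyond cur: A resets and retries, B takes lst[0] directly
        have hall : ∀ x ∈ lst, x ≤ cur := by
          intro x hx
          obtain ⟨i, hi, rfl⟩ := List.mem_iff_getElem.mp hx
          exact hrlow i hi (by omega)
        rw [pvScanFirst_of_none cur lst hall]
        rw [pvLoopA, dif_pos hlt]
        simp only [hch]
        rw [hlst]
        dsimp only
        have hscan0 : pvScanFirst (-1) lst = some (lst[0]'hlen0) := by
          refine pvScanFirst_of_first (-1) lst 0 hlen0 (by omega) ?_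
          have := hpos (lst[0]'hlen0) (List.getElem_mem hlen0)
          omega
        rw [hscan0]
        dsimp only
        rw [if_pos hrlen]
        have hget0 : (PySem.List.pyGet? lst ((0 : Nat) : Int)).getD 0 = lst[0]'hlen0 := by
          rw [PySem.List.pyGet?_natCast]
          simp [hlen0]
        rw [hget0]
        rw [ih (step + 1) (lst[0]'hlen0) (count + 1) f hrest (by omega)]
      · -- lst[r] is the first index beyond cur: both take it
        have hrlt : r < lst.length := by omega
        rw [pvScanFirst_of_first cur lst r hrlt hrlow (hrhit hrlt)]
        dsimp only
        rw [if_neg hrlen]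
        have hgetr : (PySem.List.pyGet? lst ((r : Nat) : Int)).getD 0 = lst[r]'hrlt := by
          rw [PySem.List.pyGet?_natCast]
          simp [hrlt]
        rw [hgetr]
        exact ih (step + 1) (lst[r]'hrlt) count (f + 1) hrest (by omega)

-- ===== VERDICT (by name: the statement is the Claim_ definition above) =====
theorem countMinSubsequences_spec : Claim_equal_countMinSubsequences := by
  intro source target _
  unfold Spec_countMinSubsequences countMinSubsequences countMinSubsequences_alt
  rw [pvBuild_eq]
  exact pvLoopA_eq_loopB _ (pvBuildB_good _) _ target.toList 0 (-1) 0 _ rfl (by omega)
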